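-- pv_equiv track=rewrite | github.com/deusebio/kubeflow-ci-cli | scripts/kf7415-update-base-noble/main.py | remove_python_38_block
-- ===== SOURCE A (Python) =====
-- def remove_python_38_block(text: str) -> str:
--     lines = text.splitlines()
--     result = []
--     skip = False
--     skip_next_line = False
--
--     for i in range(len(lines)):
--         line = lines[i]
--
--         if skip_next_line:
--             skip_next_line = False
--             if line.strip() == "":
--                 continue
--
--         # Check for start of the block to remove
--         if (
--             line.strip() == "- name: Set up Python 3.8" and
--             i + 2 < len(lines) and
--             "uses: actions/setup-python@v5.3.0" in lines[i + 1] and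
--             "python-version: 3.8" in lines[i + 3]
--         ):
--             skip = True
--             continue  # Skip the current line
--
--         if skip:
--             # End block after the "with:" and "python-version" lines
--             if "python-version: 3.8" in line:
--                 skip = False
--                 skip_next_line = True
--             continue  # Skip all lines in the block
--
--         result.append(line)
--
--     return "\n".join(result) + "\n"
-- ===== SOURCE B (Python) =====
-- def remove_python_38_block(text: str) -> str:
--     lines = text.splitlines()
--     n = len(lines)
--
--     def block_end(s):
--         e = s + 1
--         while e < n and "python-version: 3.8" not in lines[e]:
--             e += 1
--         if e >= n:
--             return n - 1
--         if e + 1 < n and lines[e + 1].strip() == "":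
--             return e + 1
--         return e
--
--     # stage 1: every block start, with the closed interval of lines it deletes
--     intervals = [(s, block_end(s)) for s in range(n)
--                  if lines[s].strip() == "- name: Set up Python 3.8"
--                  and s + 3 < n
--                  and "uses: actions/setup-python@v5.3.0" in lines[s + 1]
--                  and "python-version: 3.8" in lines[s + 3]]
--     # stage 2: keep the lines covered by no interval
--     kept = [lines[j] for j in range(n)
--             if not any(a <= j <= b for (a, b) in intervals)]
--     return "\n".join(kept) + "\n"
-- ===== Notes on version B (the rewrite author's own statement) =====
-- stated objective: alternative
-- what changed: Replaces A's one-pass two-boolean-flag state machine by a staged computation: first collect every block start and compute the closed interval of line indices it deletes (end line found by a forward search, plus one following blank line), then keep exactly the lines covered by no interval.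
-- crash fix: When the third-to-last line strips to '- name: Set up Python 3.8' and the second-to-last line contains 'uses: actions/setup-python@v5.3.0', A raises IndexError (it guards i+2 < len(lines) but reads lines[i+3]); B bounds-checks s+3 and returns the text unchanged (with a trailing newline appended). — e.g. on remove_python_38_block("- name: Set up Python 3.8\nuses: actions/setup-python@v5.3.0\nx"): A raises IndexError, B returns "- name: Set up Python 3.8\nuses: actions/setup-python@v5.3.0\nx\n"
import Mathlib
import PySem

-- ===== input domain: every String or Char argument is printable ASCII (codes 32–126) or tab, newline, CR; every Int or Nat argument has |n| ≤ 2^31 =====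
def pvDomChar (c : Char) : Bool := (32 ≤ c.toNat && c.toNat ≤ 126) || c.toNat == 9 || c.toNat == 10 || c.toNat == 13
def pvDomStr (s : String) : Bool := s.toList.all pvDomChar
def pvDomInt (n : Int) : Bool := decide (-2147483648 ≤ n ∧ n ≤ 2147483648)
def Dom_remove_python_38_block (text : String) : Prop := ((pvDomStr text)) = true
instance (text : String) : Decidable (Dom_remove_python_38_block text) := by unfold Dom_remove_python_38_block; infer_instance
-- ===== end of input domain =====

-- B replaces A's one-pass two-flag state machine by staged passes: collect the deletion
-- intervals of all block starts, then keep the lines covered by none; same output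
-- wherever A returns (A's IndexError inputs are outside Pre_, where B returns).

-- ===== PORT A =====
-- the block-start test of A; Python evaluates lines[i+3] after the guard i+2 < n and
-- short-circuit on lines[i+1], so it RAISES IndexError when i+3 = n and the first two
-- conjuncts hold: those inputs are outside Pre_ below; getD "" makes the test false there.
def pvCondA (lines : List String) (n i : Nat) : Bool :=
  (PySem.Str.strip (lines.getD i "") == "- name: Set up Python 3.8")
  && decide (i + 2 < n)
  && PySem.Str.isIn "uses: actions/setup-python@v5.3.0" (lines.getD (i + 1) "")
  && PySem.Str.isIn "python-version: 3.8" (lines.getD (i + 3) "")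

-- A's for-loop over range(len(lines)) with state (result, skip, skip_next_line)
def aLoop (lines : List String) (n i : Nat) (acc : List String) (skip skipNext : Bool) :
    List String :=
  if _h : i < n then
    let line := lines.getD i ""
    if skipNext && (PySem.Str.strip line == "") then
      aLoop lines n (i + 1) acc skip false
    else if pvCondA lines n i then
      aLoop lines n (i + 1) acc true false
    else if skip then
      if PySem.Str.isIn "python-version: 3.8" line then
        aLoop lines n (i + 1) acc false true
      else
        aLoop lines n (i + 1) acc skip false
    else
      aLoop lines n (i + 1) (acc ++ [line]) false false
  else acc
termination_by n - i

def remove_python_38_block (text : String) : String :=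
  let lines := PySem.Str.splitlines text
  PySem.Str.join "\n" (aLoop lines lines.length 0 [] false false) ++ "\n"

-- ===== PORT B =====
-- B's block-start test (bounds-checks s+3, so it is total)
def pvCondB (lines : List String) (n s : Nat) : Bool :=
  (PySem.Str.strip (lines.getD s "") == "- name: Set up Python 3.8")
  && decide (s + 3 < n)
  && PySem.Str.isIn "uses: actions/setup-python@v5.3.0" (lines.getD (s + 1) "")
  && PySem.Str.isIn "python-version: 3.8" (lines.getD (s + 3) "")

-- Source B's inner `while e < n and ... not in lines[e]`; fuel = n - e makes it structural
def pvFindEnd (lines : List String) : Nat → Nat → Nat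
  | 0, e => e
  | f + 1, e =>
    if PySem.Str.isIn "python-version: 3.8" (lines.getD e "") then e
    else pvFindEnd lines f (e + 1)

-- Source B's block_end
def pvBlockEnd (lines : List String) (n s : Nat) : Nat :=
  let e := pvFindEnd lines (n - (s + 1)) (s + 1)
  if e < n then
    if e + 1 < n && (PySem.Str.strip (lines.getD (e + 1) "") == "") then e + 1 else e
  else n - 1

def remove_python_38_block_alt (text : String) : String :=
  let lines := PySem.Str.splitlines text
  let n := lines.length
  let intervals := ((List.range n).filter (fun s => pvCondB lines n s)).map
      (fun s => (s, pvBlockEnd lines n s))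
  let kept := ((List.range n).filter
      (fun j => ! intervals.any (fun ab => decide (ab.1 ≤ j) && decide (j ≤ ab.2)))).map
      (fun j => lines.getD j "")
  PySem.Str.join "\n" kept ++ "\n"

-- ===== PRECONDITION & SPEC =====
-- Pre_ excludes exactly the inputs on which the Python A raises IndexError: the
-- block-start marker on the third-to-last line with the setup-python line right after it
-- makes A index lines[i+3] one past the end.
def Pre_remove_python_38_block (text : String) : Prop :=
  ¬ (3 ≤ (PySem.Str.splitlines text).length ∧
     PySem.Str.strip ((PySem.Str.splitlines text).getD ((PySem.Str.splitlines text).length - 3) "")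
       = "- name: Set up Python 3.8" ∧
     PySem.Str.isIn "uses: actions/setup-python@v5.3.0"
       ((PySem.Str.splitlines text).getD ((PySem.Str.splitlines text).length - 2) "") = true)
instance (text : String) : Decidable (Pre_remove_python_38_block text) := by
  unfold Pre_remove_python_38_block; infer_instance

def pvWitness_remove_python_38_block : String :=
  "- name: Set up Python 3.8\n  uses: actions/setup-python@v5.3.0\nwith:\n    python-version: 3.8\n\nnext step"

-- On inputs whose third-to-last line strips to "- name: Set up Python 3.8" and whose
-- second-to-last line contains "uses: actions/setup-python@v5.3.0", A raises IndexError
-- (lines[i+3] past the end); B returns the text unchanged (with trailing newline normalised).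
def Raises_remove_python_38_block (text : String) : Prop :=
  3 ≤ (PySem.Str.splitlines text).length ∧
  PySem.Str.strip ((PySem.Str.splitlines text).getD ((PySem.Str.splitlines text).length - 3) "")
    = "- name: Set up Python 3.8" ∧
  PySem.Str.isIn "uses: actions/setup-python@v5.3.0"
    ((PySem.Str.splitlines text).getD ((PySem.Str.splitlines text).length - 2) "") = true
instance (text : String) : Decidable (Raises_remove_python_38_block text) := by
  unfold Raises_remove_python_38_block; infer_instance

def pvRaiseWitness_remove_python_38_block : String :=
  "- name: Set up Python 3.8\nuses: actions/setup-python@v5.3.0\nx"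
def pvRaiseWitnessOut_remove_python_38_block : String :=
  "- name: Set up Python 3.8\nuses: actions/setup-python@v5.3.0\nx\n"

def Spec_remove_python_38_block (text : String) (out : String) : Prop :=
  out = remove_python_38_block_alt text
instance (text : String) (out : String) : Decidable (Spec_remove_python_38_block text out) := by
  unfold Spec_remove_python_38_block; infer_instance

-- ===== CLAIM (what is proved, stated in full; the proofs are below) =====
def Claim_equal_remove_python_38_block : Prop :=
  ∀ (text : String), Dom_remove_python_38_block text → Pre_remove_python_38_block text →
    Spec_remove_python_38_block text (remove_python_38_block text)

-- crash-fix claim, proved at the bottom as remove_python_38_block_raises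
def Claim_raises_remove_python_38_block : Prop :=
  (∀ (text : String), Dom_remove_python_38_block text → Raises_remove_python_38_block text →
      ¬ Pre_remove_python_38_block text) ∧
  (Dom_remove_python_38_block (pvRaiseWitness_remove_python_38_block) ∧
   Raises_remove_python_38_block (pvRaiseWitness_remove_python_38_block) ∧
   remove_python_38_block_alt (pvRaiseWitness_remove_python_38_block)
     = pvRaiseWitnessOut_remove_python_38_block)

-- ===== LEMMAS AND PROOFS =====

-- proof-side first-end-line search (well-founded form of Source B's inner while)
def bSkip (lines : List String) (n i : Nat) : Nat :=
  if _h : i < n then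
    if PySem.Str.isIn "python-version: 3.8" (lines.getD i "") then i
    else bSkip lines n (i + 1)
  else i
termination_by n - i

theorem bSkip_ge (lines : List String) (n i : Nat) : i ≤ bSkip lines n i := by
  rw [bSkip]
  split
  · split
    · exact Nat.le_refl i
    · exact Nat.le_trans (Nat.le_succ i) (bSkip_ge lines n (i + 1))
  · exact Nat.le_refl i
termination_by n - i

theorem bSkip_le (lines : List String) (n i : Nat) (h : i ≤ n) : bSkip lines n i ≤ n := by
  rw [bSkip]
  split
  · split
    · exact Nat.le_of_lt ‹i < n›
    · exact bSkip_le lines n (i + 1) ‹i < n›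
  · exact h
termination_by n - i

theorem bSkip_pv (lines : List String) (n i : Nat) (h : bSkip lines n i < n) :
    PySem.Str.isIn "python-version: 3.8" (lines.getD (bSkip lines n i) "") = true := by
  rw [bSkip] at h ⊢
  by_cases hin : i < n
  · rw [dif_pos hin] at h ⊢
    cases hpv : PySem.Str.isIn "python-version: 3.8" (lines.getD i "") with
    | true => simp only [hpv, if_true]
    | false =>
      simp only [hpv, Bool.false_eq_true, if_false] at h ⊢
      exact bSkip_pv lines n (i + 1) h
  · rw [dif_neg hin] at h; omega
termination_by n - i

theorem bSkip_between (lines : List String) (n i j : Nat) (hij : i ≤ j)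
    (hj : j ≤ bSkip lines n i) : bSkip lines n j = bSkip lines n i := by
  rcases Nat.eq_or_lt_of_le hij with rfl | hlt
  · rfl
  · rw [bSkip] at hj
    by_cases h1 : i < n
    · rw [dif_pos h1] at hj
      cases hpv : PySem.Str.isIn "python-version: 3.8" (lines.getD i "") with
      | true => simp only [hpv, if_true] at hj; omega
      | false =>
        simp only [hpv, Bool.false_eq_true, if_false] at hj
        have hstep : bSkip lines n i = bSkip lines n (i + 1) := by
          rw [bSkip, dif_pos h1, hpv]
          simp
        rw [hstep]
        exact bSkip_between lines n (i + 1) j hlt hj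
    · rw [dif_neg h1] at hj; omega
termination_by j - i

-- the fuel search of the port computes bSkip
theorem findEnd_eq (lines : List String) (n : Nat) :
    ∀ (f i : Nat), f = n - i → pvFindEnd lines f i = bSkip lines n i := by
  intro f
  induction f with
  | zero =>
    intro i hf
    rw [pvFindEnd, bSkip]
    have : ¬ i < n := by omega
    simp [this]
  | succ f ih =>
    intro i hf
    have hi : i < n := by omega
    rw [pvFindEnd, bSkip]
    simp only [hi, dif_pos]
    split
    · rfl
    · exact ih (i + 1) (by omega)

-- pvBlockEnd in terms of bSkip
theorem blockEnd_eq (lines : List String) (n s : Nat) :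
    pvBlockEnd lines n s =
      (if bSkip lines n (s + 1) < n then
        (if bSkip lines n (s + 1) + 1 < n
            && (PySem.Str.strip (lines.getD (bSkip lines n (s + 1) + 1) "") == "")
         then bSkip lines n (s + 1) + 1 else bSkip lines n (s + 1))
       else n - 1) := by
  unfold pvBlockEnd
  rw [findEnd_eq lines n (n - (s + 1)) (s + 1) rfl]

-- a non-space character of s survives Python's strip
theorem mem_strip_of_mem {c : Char} {cs : List Char} (h : c ∈ cs)
    (hns : PySem.Chars.isspace c = false) : c ∈ PySem.Chars.strip cs := by
  unfold PySem.Chars.strip PySem.Chars.rstrip PySem.Chars.lstrip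
  have step : ∀ l : List Char, c ∈ l → c ∈ List.dropWhile PySem.Chars.isspace l := by
    intro l hl
    rcases List.mem_append.mp (by rw [List.takeWhile_append_dropWhile]; exact hl :
        c ∈ List.takeWhile PySem.Chars.isspace l ++ List.dropWhile PySem.Chars.isspace l) with h1 | h2
    · exact absurd (List.mem_takeWhile_imp h1) (by simp [hns])
    · exact h2
  have h1 := step cs h
  have h2 := step (List.dropWhile PySem.Chars.isspace cs).reverse (List.mem_reverse.mpr h1)
  exact List.mem_reverse.mpr h2

-- a line that strips to the marker cannot contain "python-version: 3.8" ('v' would survive)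
theorem strip_marker_no_pv (s : String)
    (h : PySem.Str.strip s = "- name: Set up Python 3.8") :
    PySem.Str.isIn "python-version: 3.8" s = false := by
  cases hb : PySem.Str.isIn "python-version: 3.8" s with
  | false => rfl
  | true =>
    exfalso
    have hinf := (PySem.Str.isIn_iff_infix _ _).mp hb
    have hv : 'v' ∈ s.toList := hinf.sublist.subset (by decide)
    have hv' : 'v' ∈ PySem.Chars.strip s.toList :=
      mem_strip_of_mem hv (by decide)
    rw [← PySem.Str.toList_strip, h] at hv'
    revert hv'
    decide

-- if condA succeeds the current line strips to the marker
theorem condA_strip {lines : List String} {n i : Nat} (h : pvCondA lines n i = true) :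
    PySem.Str.strip (lines.getD i "") = "- name: Set up Python 3.8" := by
  unfold pvCondA at h
  simp only [Bool.and_eq_true, beq_iff_eq] at h
  exact h.1.1.1

theorem condB_strip {lines : List String} {n i : Nat} (h : pvCondB lines n i = true) :
    PySem.Str.strip (lines.getD i "") = "- name: Set up Python 3.8" := by
  unfold pvCondB at h
  simp only [Bool.and_eq_true, beq_iff_eq] at h
  exact h.1.1.1

-- the two block-start tests agree (A's out-of-range access is getD "" in the port)
theorem cond_eq (lines : List String) (n i : Nat) (hn : n = lines.length) :
    pvCondA lines n i = pvCondB lines n i := by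
  unfold pvCondA pvCondB
  by_cases h3 : i + 3 < n
  · have h2 : i + 2 < n := by omega
    have d2 : decide (i + 2 < n) = true := by simp [h2]
    have d3 : decide (i + 3 < n) = true := by simp [h3]
    rw [d2, d3]
  · by_cases h2 : i + 2 < n
    · have hd : lines.getD (i + 3) "" = "" := List.getD_eq_default _ _ (by omega)
      have hpv : PySem.Str.isIn "python-version: 3.8" "" = false := by decide
      have d3 : decide (i + 3 < n) = false := by simp [h3]
      rw [hd, hpv, d3]
      simp only [Bool.and_false, Bool.false_and]
    · have d2 : decide (i + 2 < n) = false := by simp [h2]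
      have d3 : decide (i + 3 < n) = false := by simp [h3]
      rw [d2, d3]

-- proof-side cursor loop: intermediate between A's flag machine and B's staged passes
def cLoop (lines : List String) (n i : Nat) (acc : List String) : List String :=
  if _h : i < n then
    if pvCondB lines n i then
      let j := bSkip lines n (i + 1) + 1
      let k := if j < n && (PySem.Str.strip (lines.getD j "") == "") then j + 1 else j
      cLoop lines n k acc
    else
      cLoop lines n (i + 1) (acc ++ [lines.getD i ""])
  else acc
termination_by n - i
decreasing_by
  · have := bSkip_ge lines n (i + 1)
    split <;> omega
  · omega

theorem cLoop_stop (lines : List String) (n i : Nat) (acc : List String) (h : ¬ i < n) :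
    cLoop lines n i acc = acc := by
  rw [cLoop]; simp [h]

-- with skip_next_line set but a non-blank current line, A behaves as with it clear
theorem aLoop_skipNext_nonblank (lines : List String) (n i : Nat) (acc : List String)
    (h : (PySem.Str.strip (lines.getD i "") == "") = false) :
    aLoop lines n i acc false true = aLoop lines n i acc false false := by
  conv_lhs => rw [aLoop]
  conv_rhs => rw [aLoop]
  simp only [Bool.true_and, Bool.false_and, h, Bool.false_eq_true, if_false]

-- A's skip state consumes lines up to (and incl.) the first "python-version: 3.8" line
theorem aLoop_skip (lines : List String) (n : Nat) (hn : n = lines.length) (i : Nat)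
    (acc : List String) :
    aLoop lines n i acc true false =
      (if bSkip lines n i < n then aLoop lines n (bSkip lines n i + 1) acc false true
       else acc) := by
  by_cases h : i < n
  · have hsk : bSkip lines n i =
        (if PySem.Str.isIn "python-version: 3.8" (lines.getD i "") = true then i
         else bSkip lines n (i + 1)) := by
      rw [bSkip]; simp only [h, dif_pos]
    rw [aLoop, hsk]
    cases hpv : PySem.Str.isIn "python-version: 3.8" (lines.getD i "") with
    | true =>
      have hca : pvCondA lines n i = false := by
        cases hc : pvCondA lines n i with
        | false => rfl
        | true =>
          rw [strip_marker_no_pv _ (condA_strip hc)] at hpv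
          exact absurd hpv (by simp)
      simp only [h, dif_pos, Bool.false_and, Bool.false_eq_true, if_false, hca, hpv,
        if_true]
    | false =>
      have ih := aLoop_skip lines n hn (i + 1) acc
      simp only [h, dif_pos, Bool.false_and, Bool.false_eq_true, if_false, hpv, if_true]
      rw [← ih]
      simp only [ite_self]
  · have hsk : bSkip lines n i = i := by rw [bSkip]; simp [h]
    rw [aLoop, hsk]
    simp [h]
termination_by n - i

-- first correspondence: A's flag machine = the cursor loop
theorem loop_eq (lines : List String) (n : Nat) (hn : n = lines.length) (i : Nat)
    (acc : List String) :
    aLoop lines n i acc false false = cLoop lines n i acc := by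
  by_cases h : i < n
  · have hA : aLoop lines n i acc false false =
        (if pvCondA lines n i = true then aLoop lines n (i + 1) acc true false
         else aLoop lines n (i + 1) (acc ++ [lines.getD i ""]) false false) := by
      rw [aLoop]
      simp only [h, dif_pos, Bool.false_and, Bool.false_eq_true, if_false]
    have hB : cLoop lines n i acc =
        (if pvCondB lines n i = true then
          cLoop lines n
            (if (decide (bSkip lines n (i + 1) + 1 < n) &&
                  (PySem.Str.strip (lines.getD (bSkip lines n (i + 1) + 1) "") == "")) = true
             then bSkip lines n (i + 1) + 1 + 1 else bSkip lines n (i + 1) + 1) acc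
         else cLoop lines n (i + 1) (acc ++ [lines.getD i ""])) := by
      rw [cLoop]
      simp only [h, dif_pos]
    rw [hA, hB, cond_eq lines n i hn]
    cases hc : pvCondB lines n i with
    | true =>
      have hge := bSkip_ge lines n (i + 1)
      rw [if_pos rfl, if_pos rfl, aLoop_skip lines n hn (i + 1) acc]
      by_cases h1 : bSkip lines n (i + 1) < n
      · rw [if_pos h1]
        by_cases h2 : bSkip lines n (i + 1) + 1 < n
        · have d2 : decide (bSkip lines n (i + 1) + 1 < n) = true := by simp [h2]
          cases hbl : (PySem.Str.strip (lines.getD (bSkip lines n (i + 1) + 1) "") == "") with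
          | true =>
            -- blank line right after the block: both consume it
            rw [aLoop]
            simp only [h2, dif_pos, hbl, Bool.and_self, if_true]
            exact loop_eq lines n hn (bSkip lines n (i + 1) + 1 + 1) acc
          | false =>
            -- non-blank: A falls through with the flag cleared
            rw [aLoop_skipNext_nonblank lines n (bSkip lines n (i + 1) + 1) acc hbl]
            simp only [d2, Bool.and_false, Bool.false_eq_true, if_false]
            exact loop_eq lines n hn (bSkip lines n (i + 1) + 1) acc
        · -- the block's last line is the last line of the file
          have d2 : decide (bSkip lines n (i + 1) + 1 < n) = false := by simp [h2]
          rw [aLoop]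
          simp only [d2, Bool.false_and, Bool.false_eq_true, if_false, dif_neg h2]
          rw [cLoop_stop lines n (bSkip lines n (i + 1) + 1) acc h2]
      · -- no end line found: A skips to the end of the file
        have d2 : decide (bSkip lines n (i + 1) + 1 < n) = false := by simp; omega
        rw [if_neg h1]
        simp only [d2, Bool.false_and, Bool.false_eq_true, if_false]
        rw [cLoop_stop lines n (bSkip lines n (i + 1) + 1) acc (by omega)]
    | false =>
      rw [if_neg (by simp), if_neg (by simp)]
      exact loop_eq lines n hn (i + 1) (acc ++ [lines.getD i ""])
  · rw [aLoop, cLoop]; simp [h]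
termination_by n - i
decreasing_by all_goals omega

-- "line j is deleted by some block interval", as Source B's any-test computes it
def deadAt (lines : List String) (n j : Nat) : Bool :=
  ((List.range n).filter (fun s => pvCondB lines n s)).any
    (fun s => decide (s ≤ j) && decide (j ≤ pvBlockEnd lines n s))

theorem deadAt_iff (lines : List String) (n j : Nat) :
    deadAt lines n j = true ↔
      ∃ s, s < n ∧ pvCondB lines n s = true ∧ s ≤ j ∧ j ≤ pvBlockEnd lines n s := by
  unfold deadAt
  simp [List.any_eq_true, List.mem_range]

-- second correspondence: the cursor loop = filter by deadAt, under the invariant that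
-- every block start before the cursor has its interval entirely before the cursor
theorem cLoop_eq_filter (lines : List String) (n : Nat) (hn : n = lines.length) (i : Nat)
    (acc : List String)
    (hinv : ∀ s, s < i → pvCondB lines n s = true → pvBlockEnd lines n s < i) :
    cLoop lines n i acc =
      acc ++ ((List.range' i (n - i)).filter (fun j => ! deadAt lines n j)).map
        (fun j => lines.getD j "") := by
  by_cases h : i < n
  · rw [cLoop]
    simp only [h, dif_pos]
    cases hc : pvCondB lines n i with
    | false =>
      have hdead : deadAt lines n i = false := by
        rw [Bool.eq_false_iff, Ne, deadAt_iff]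
        rintro ⟨s, hsn, hcs, hsi, his⟩
        rcases Nat.lt_or_ge s i with hlt | hge
        · exact absurd his (by have := hinv s hlt hcs; omega)
        · have : s = i := by omega
          rw [this, hc] at hcs; exact absurd hcs (by simp)
      have hrange : List.range' i (n - i) = i :: List.range' (i + 1) (n - (i + 1)) := by
        have : n - i = (n - (i + 1)) + 1 := by omega
        rw [this, List.range'_succ]
      rw [hrange]
      simp only [List.filter_cons, hdead, Bool.not_false]
      rw [cLoop_eq_filter lines n hn (i + 1) (acc ++ [lines.getD i ""]) ?_]
      · simp
      · intro s hs hcs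
        rcases Nat.lt_or_ge s i with hlt | hge
        · exact Nat.lt_succ_of_lt (hinv s hlt hcs)
        · have : s = i := by omega
          rw [this, hc] at hcs; exact absurd hcs (by simp)
    | true =>
      set e := bSkip lines n (i + 1) with he
      have hge : i + 1 ≤ e := bSkip_ge lines n (i + 1)
      have hle : e ≤ n := bSkip_le lines n (i + 1) (by omega)
      set k := if (decide (e + 1 < n) && (PySem.Str.strip (lines.getD (e + 1) "") == "")) = true
          then e + 1 + 1 else e + 1 with hk
      -- the interval of start i: [i, pvBlockEnd i], and k = min over where to resume
      have hbe : pvBlockEnd lines n i =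
          (if e < n then
            (if (decide (e + 1 < n) && (PySem.Str.strip (lines.getD (e + 1) "") == "")) = true
             then e + 1 else e)
           else n - 1) := by
        rw [blockEnd_eq]
      have hkbe : e < n → k = pvBlockEnd lines n i + 1 := by
        intro h1
        rw [hbe, hk]
        simp only [h1, if_true]
        cases hq : (decide (e + 1 < n) && (PySem.Str.strip (lines.getD (e + 1) "") == "")) with
        | true => simp
        | false => simp
      have hbeg : e < n → e ≤ pvBlockEnd lines n i := by
        intro h1
        rw [hbe]
        simp only [h1, if_true]
        split <;> omega
      have hben : ¬ e < n → pvBlockEnd lines n i = n - 1 ∧ k = e + 1 := by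
        intro h1
        have hq : (decide (e + 1 < n) && (PySem.Str.strip (lines.getD (e + 1) "") == "")) = false := by
          have hd : decide (e + 1 < n) = false := by simp; omega
          rw [hd]; simp
        constructor
        · rw [hbe]; simp only [h1, if_false]
        · rw [hk, hq]; simp
      have hki : i < k := by
        by_cases h1 : e < n
        · have h2 := hkbe h1; have h3 := hbeg h1; omega
        · have h2 := (hben h1).2; omega
      have hbk : pvBlockEnd lines n i < k := by
        by_cases h1 : e < n
        · have h2 := hkbe h1; omega
        · have h2 := hben h1; omega
      have hkb : k ≤ pvBlockEnd lines n i + 1 ∨ (e = n ∧ pvBlockEnd lines n i = n - 1) := by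
        by_cases h1 : e < n
        · left; have := hkbe h1; omega
        · right; exact ⟨by omega, (hben h1).1⟩
      -- any start s in [i, k) has the same block end as i (or is not a start)
      have hsame : ∀ s, i ≤ s → s < k → pvCondB lines n s = true →
          pvBlockEnd lines n s = pvBlockEnd lines n i := by
        intro s hs1 hs2 hcs
        rcases Nat.eq_or_lt_of_le hs1 with rfl | hlt
        · rfl
        · -- i < s < k; s strips to marker so s ≠ e (when e < n, e holds pv), s ≠ e+1 blank
          have hsm := condB_strip hcs
          have hspv : PySem.Str.isIn "python-version: 3.8" (lines.getD s "") = false :=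
            strip_marker_no_pv _ hsm
          have hse : s < e ∨ e = n := by
            by_cases h1 : e < n
            · left
              have hpv := bSkip_pv lines n (i + 1) (by rw [← he]; omega)
              rw [← he] at hpv
              -- s ≤ e? s < k; k ≤ e+2; if s = e then pv at s contradicts hspv;
              -- if s = e+1 then k = e+2 and line e+1 is blank, strip "" ≠ marker
              have hsk : s < k := hs2
              rw [hk] at hsk
              by_cases hs_e : s < e
              · exact hs_e
              · exfalso
                have hse' : s = e ∨ s = e + 1 := by split at hsk <;> omega
                rcases hse' with rfl | rfl
                · rw [hpv] at hspv; exact absurd hspv (by simp)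
                · -- blank case must have been taken in k
                  have hblank : (PySem.Str.strip (lines.getD (e + 1) "") == "") = true := by
                    by_contra hb
                    rw [Bool.not_eq_true] at hb
                    rw [hb] at hsk
                    simp at hsk
                  rw [hsm] at hblank
                  exact absurd hblank (by decide)
            · right; omega
          rcases hse with hlt' | hn'
          · -- bSkip from s+1 equals e
            have : bSkip lines n (s + 1) = e := by
              rw [he]
              exact bSkip_between lines n (i + 1) (s + 1) (by omega) (by rw [← he]; omega)
            rw [blockEnd_eq, this, hbe]
          · -- no end line anywhere ≥ i+1: both block ends are n-1
            have hsn : bSkip lines n (s + 1) = n := by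
              have h1 : s + 1 ≤ n := by
                unfold pvCondB at hcs
                simp only [Bool.and_eq_true, decide_eq_true_eq] at hcs
                omega
              have := bSkip_between lines n (i + 1) (s + 1) (by omega) (by omega)
              rw [this, ← he, hn']
            rw [blockEnd_eq, hsn, hbe, hn']
      -- every j in [i, min k n) is dead (witness s = i)
      have hdead : ∀ j, i ≤ j → j < k → j < n → deadAt lines n j = true := by
        intro j hj1 hj2 hj3
        rw [deadAt_iff]
        refine ⟨i, h, hc, hj1, ?_⟩
        rcases hkb with hk1 | ⟨_, hb1⟩
        · omega
        · omega
      -- split the range at m := min k n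
      have hmn : min k n ≤ n := Nat.min_le_right _ _
      have him : i ≤ min k n := by omega
      have hsplit : List.range' i (n - i) =
          List.range' i (min k n - i) ++ List.range' (min k n) (n - min k n) := by
        rw [show n - i = (min k n - i) + (n - min k n) from by omega, ← List.range'_append,
            show i + 1 * (min k n - i) = min k n from by omega]
      have hnil : (List.range' i (min k n - i)).filter (fun j => ! deadAt lines n j) = [] := by
        rw [List.filter_eq_nil_iff]
        intro j hj
        have hj' : i ≤ j ∧ j < i + (min k n - i) := List.mem_range'_1.mp hj
        rw [hdead j hj'.1 (by omega) (by omega)]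
        simp
      rw [hsplit, List.filter_append, hnil, List.nil_append]
      -- range' (min k n) (n - min k n) filtered = range' k (n - k) filtered
      have hrest : List.range' (min k n) (n - min k n) = List.range' k (n - k) := by
        rcases Nat.le_total k n with h1 | h1
        · rw [Nat.min_eq_left h1]
        · have : n - k = 0 := by omega
          rw [Nat.min_eq_right h1, this]
          simp
      rw [hrest]
      -- recurse at k with the strengthened invariant
      exact cLoop_eq_filter lines n hn k acc (by
        intro s hs hcs
        rcases Nat.lt_or_ge s i with hlt | hge'
        · exact lt_of_lt_of_le (hinv s hlt hcs) (by omega)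
        · rw [hsame s hge' hs hcs]; exact hbk)
  · rw [cLoop_stop lines n i acc h]
    have : n - i = 0 := by omega
    rw [this]
    simp
termination_by n - i
decreasing_by
  · omega
  · have := bSkip_ge lines n (i + 1)
    split <;> omega

-- ===== VERDICT (by name: the statement is the Claim_ definition above) =====
theorem remove_python_38_block_spec : Claim_equal_remove_python_38_block := by
  intro text _ _
  unfold Spec_remove_python_38_block
  show remove_python_38_block text = remove_python_38_block_alt text
  show PySem.Str.join "\n"
      (aLoop (PySem.Str.splitlines text) (PySem.Str.splitlines text).length 0 [] false false)
      ++ "\n" =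
    PySem.Str.join "\n"
      (((List.range (PySem.Str.splitlines text).length).filter
          (fun j => ! (((List.range (PySem.Str.splitlines text).length).filter
                (fun s => pvCondB (PySem.Str.splitlines text) (PySem.Str.splitlines text).length s)).map
              (fun s => (s, pvBlockEnd (PySem.Str.splitlines text) (PySem.Str.splitlines text).length s))).any
            (fun ab => decide (ab.1 ≤ j) && decide (j ≤ ab.2)))).map
        (fun j => (PySem.Str.splitlines text).getD j ""))
      ++ "\n"
  rw [loop_eq (PySem.Str.splitlines text) (PySem.Str.splitlines text).length rfl 0 [],
      cLoop_eq_filter (PySem.Str.splitlines text) (PySem.Str.splitlines text).length rfl 0 []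
        (by intro s hs; omega)]
  simp only [List.nil_append, Nat.sub_zero, ← List.range_eq_range']
  congr 1
  congr 1
  congr 1
  apply List.filter_congr
  intro j _
  unfold deadAt
  rw [List.any_map]
  rfl

theorem remove_python_38_block_raises : Claim_raises_remove_python_38_block := by
  unfold Claim_raises_remove_python_38_block
  refine ⟨fun text _ hr hp => hp hr, by decide, by decide, by decide⟩

-- witness self-check: the raise witness really lies in the raise region
theorem remove_python_38_block_raises_ok :
    Raises_remove_python_38_block pvRaiseWitness_remove_python_38_block :=
  remove_python_38_block_raises.2.2.1
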